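-- pv_equiv track=rewrite | github.com/bigfrog10/python-data-structure-algo-tutorial | src/companies/point72/fsm/fsm.py | process
-- ===== SOURCE A (Python) =====
-- def process(s):
--     state = 1
--     for c in s:
--         if c == 'a':
--             pass
--         elif c == 'b':
--             state += 1
--             if state > 3:
--                 state = 1
--         else:
--             return False
--
--     return state == 3
-- ===== SOURCE B (Python) =====
-- def process(s):
--     return all(c in ('a', 'b') for c in s) and s.count('b') % 3 == 2
-- ===== Notes on version B (the rewrite author's own statement) =====
-- stated objective: simpler
-- what changed: Replaces the per-character FSM simulation with a closed form: validate the alphabet and test s.count('b') % 3 == 2.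
import Mathlib
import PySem

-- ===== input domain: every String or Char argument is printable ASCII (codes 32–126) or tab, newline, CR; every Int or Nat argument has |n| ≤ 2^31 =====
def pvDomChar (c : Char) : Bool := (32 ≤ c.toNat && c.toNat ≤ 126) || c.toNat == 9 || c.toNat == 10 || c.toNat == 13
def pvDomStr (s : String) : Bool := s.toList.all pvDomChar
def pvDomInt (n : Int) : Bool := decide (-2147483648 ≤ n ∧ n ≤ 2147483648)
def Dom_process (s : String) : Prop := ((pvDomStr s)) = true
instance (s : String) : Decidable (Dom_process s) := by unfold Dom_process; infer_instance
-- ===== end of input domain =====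

-- B replaces the per-character finite-state-machine simulation by a closed form
-- (alphabet check + count of 'b' mod 3); objective: simpler.

-- ===== PORT A =====
-- the FSM loop: early `return False` on a foreign character, state updated mod 3 (1..3)
def processGo : List Char → Int → Bool
  | [], st => st == 3
  | c :: cs, st =>
    if c = 'a' then processGo cs st
    else if c = 'b' then
      let st' := st + 1
      processGo cs (if st' > 3 then 1 else st')
    else false

def process (s : String) : Bool := processGo s.toList 1

-- ===== PORT B =====
def process_alt (s : String) : Bool :=
  (s.toList.all (fun c => c = 'a' || c = 'b'))
    && (PySem.Int.mod (s.toList.count 'b' : Int) 3 == 2)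

-- ===== PRECONDITION & SPEC =====
def Spec_process (s : String) (out : Bool) : Prop := out = process_alt s
instance (s : String) (out : Bool) : Decidable (Spec_process s out) := by unfold Spec_process; infer_instance

-- ===== CLAIM (what is proved, stated in full; the proofs are below) =====
def Claim_equal_process : Prop := ∀ (s : String), Dom_process s → Spec_process s (process s)

-- ===== LEMMAS AND PROOFS =====

theorem processGo_eq (cs : List Char) :
    ∀ st : Int, (st = 1 ∨ st = 2 ∨ st = 3) →
    processGo cs st
      = ((cs.all (fun c => c = 'a' || c = 'b'))
          && ((st - 1 + (cs.count 'b' : Int)) % 3 == 2)) := by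
  induction cs with
  | nil =>
    intro st hst
    rcases hst with h | h | h <;> subst h <;> decide
  | cons c cs ih =>
    intro st hst
    by_cases ha : c = 'a'
    · simp [processGo, ha, ih st hst]
    · by_cases hb : c = 'b'
      · subst hb
        rcases hst with h | h | h <;> subst h <;>
          simp only [processGo, List.count_cons, List.all_cons,
            if_neg ha] <;>
          norm_num
        · rw [ih 2 (by norm_num)]
          congr 1
          ring_nf
        · rw [ih 3 (by norm_num)]
          congr 1
          ring_nf
        · rw [ih 1 (by norm_num)]
          congr 1
          ring_nf
          have h3 : ((3:Int) + (cs.count 'b' : Int)) % 3 = (cs.count 'b' : Int) % 3 := by omega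
          rw [h3]
      · simp [processGo, ha, hb]

-- ===== VERDICT (by name: the statement is the Claim_ definition above) =====
theorem process_spec : Claim_equal_process := by
  unfold Claim_equal_process
  intro s _
  unfold Spec_process process process_alt
  rw [processGo_eq s.toList 1 (by norm_num)]
  rw [PySem.Int.mod_eq_emod_of_pos (by norm_num)]
  congr 2
  omega
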